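-- pv_equiv track=rewrite | github.com/ci5437-ene-mar-2018/proyecto-3-liay | proyecto-3/ruleGenerator.py | joinRules
-- ===== SOURCE A (Python) =====
-- def appendable(rule1, rule2):
-- 	for var1 in rule1:
-- 		for var2 in rule2:
-- 			if abs(var1) >= abs(var2):
-- 				return False
--
-- 	return True
--
-- def joinRules(ruleList1, ruleList2):
--
-- 	joinedRules = []
--
-- 	for rules1 in ruleList1:
-- 		for rules2 in ruleList2:
-- 			try:
-- 				flatRule1 = list({x for rule in rules1 for x in rule})
--
-- 				flatRule2 = list({x for rule in rules2 for x in rule})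
--
-- 				if appendable(flatRule1, flatRule2):
-- 					joinedRules.append(rules1+rules2)
--
-- 			except:
-- 				flatRule1 = rules1
--
-- 				flatRule2 = list({x for rule in rules2 for x in rule})
--
-- 				if appendable(flatRule1, flatRule2):
-- 					joinedRules.append([rules1]+rules2)
--
--
-- 	joinedRules = set(tuple(x) for rules in joinedRules for x in rules)
--
-- 	joinedRules = list(list(tupleRule) for tupleRule in joinedRules)
--
-- 	list((x for x in joinedRules))
--
-- 	return joinedRules
-- ===== SOURCE B (Python) =====
-- def joinRules(ruleList1, ruleList2):
--     # Precompute one number per block: max |x| for each rules1, min |x| for each rules2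
--     # (None for blocks with no literals). A pair is joinable iff either bound is
--     # missing or max|rules1| < min|rules2| -- equivalent to the all-pairs test.
--     maxes = [max((abs(x) for rule in rs for x in rule), default=None) for rs in ruleList1]
--     mins = [min((abs(x) for rule in rs for x in rule), default=None) for rs in ruleList2]
--     seen = {}
--     for rs1, M in zip(ruleList1, maxes):
--         for rs2, m in zip(ruleList2, mins):
--             if M is None or m is None or M < m:
--                 for rule in rs1:
--                     seen.setdefault(tuple(rule), None)
--                 for rule in rs2:
--                     seen.setdefault(tuple(rule), None)
--     return [list(t) for t in seen]
-- ===== Notes on version B (the rewrite author's own statement) =====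
-- stated objective: faster
-- what changed: B precomputes one bound per block (max |x| of each rules1, min |x| of each rules2) once, decides each pair by a single O(1) comparison instead of A's per-pair set-flattening plus all-pairs appendable scan, and deduplicates the output incrementally in one dict pass instead of a final set rebuild.
import Mathlib
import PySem

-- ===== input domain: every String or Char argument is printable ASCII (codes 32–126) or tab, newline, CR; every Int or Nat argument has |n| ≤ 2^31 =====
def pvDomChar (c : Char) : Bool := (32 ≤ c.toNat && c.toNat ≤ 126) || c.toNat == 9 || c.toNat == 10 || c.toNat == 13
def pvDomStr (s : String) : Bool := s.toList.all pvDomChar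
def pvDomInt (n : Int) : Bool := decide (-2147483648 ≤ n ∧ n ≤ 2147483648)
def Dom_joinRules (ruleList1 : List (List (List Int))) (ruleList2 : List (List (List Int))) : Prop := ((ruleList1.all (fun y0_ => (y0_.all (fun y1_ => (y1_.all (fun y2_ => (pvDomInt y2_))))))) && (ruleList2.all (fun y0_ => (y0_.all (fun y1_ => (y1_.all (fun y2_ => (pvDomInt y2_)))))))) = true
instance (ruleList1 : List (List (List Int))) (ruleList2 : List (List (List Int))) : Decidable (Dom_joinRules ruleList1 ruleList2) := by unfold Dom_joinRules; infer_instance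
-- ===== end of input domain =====

-- B replaces A's all-pairs `appendable` test on deduplicated flattened blocks by two precomputed
-- per-block bounds (max |x| per rules1, min |x| per rules2) and builds the deduplicated output in
-- one pass; equality is of the RETURN value as the same deduplicated list (A's Python output order
-- is set hash order, compared as a set).

-- ===== PORT A =====
-- the double loop with early `return False` is `all` of the negated condition
def appendable (rule1 : List Int) (rule2 : List Int) : Bool :=
  rule1.all (fun var1 => rule2.all (fun var2 => decide (|var1| < |var2|)))

-- the `except` branch is unreachable for list[list[list[int]]] inputs (the set comprehensions over
-- ints cannot raise), so only the `try` branch is ported.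
def joinRules (ruleList1 : List (List (List Int))) (ruleList2 : List (List (List Int))) : List (List Int) :=
  let joinedRules :=
    ruleList1.foldl (fun acc rules1 =>
      ruleList2.foldl (fun acc rules2 =>
        let flatRule1 := PySem.Set.ofList rules1.flatten
        let flatRule2 := PySem.Set.ofList rules2.flatten
        if appendable flatRule1 flatRule2 then acc ++ [rules1 ++ rules2] else acc) acc) []
  -- set(tuple(x) for rules in joinedRules for x in rules), then back to lists
  PySem.Set.ofList joinedRules.flatten

-- ===== PORT B =====
def pvMaxAbs? (rs : List (List Int)) : Option Int := (rs.flatten.map (fun x => |x|)).max?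
def pvMinAbs? (rs : List (List Int)) : Option Int := (rs.flatten.map (fun x => |x|)).min?

def pvOk (M : Option Int) (m : Option Int) : Bool :=
  match M, m with
  | some M, some m => decide (M < m)
  | _, _ => true

def joinRules_alt (ruleList1 : List (List (List Int))) (ruleList2 : List (List (List Int))) : List (List Int) :=
  let maxes := ruleList1.map (fun rs => (rs, pvMaxAbs? rs))
  let mins := ruleList2.map (fun rs => (rs, pvMinAbs? rs))
  maxes.foldl (fun seen p =>
    mins.foldl (fun seen q =>
      if pvOk p.2 q.2 then PySem.Set.update (PySem.Set.update seen p.1) q.1 else seen) seen)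
    PySem.Set.empty

-- ===== PRECONDITION & SPEC =====
def Spec_joinRules (ruleList1 : List (List (List Int))) (ruleList2 : List (List (List Int))) (out : List (List Int)) : Prop := out = joinRules_alt ruleList1 ruleList2
instance (ruleList1 : List (List (List Int))) (ruleList2 : List (List (List Int))) (out : List (List Int)) : Decidable (Spec_joinRules ruleList1 ruleList2 out) := by unfold Spec_joinRules; infer_instance

-- ===== CLAIM (what is proved, stated in full; the proofs are below) =====
def Claim_equal_joinRules : Prop := ∀ (ruleList1 : List (List (List Int))) (ruleList2 : List (List (List Int))), Dom_joinRules ruleList1 ruleList2 → Spec_joinRules ruleList1 ruleList2 (joinRules ruleList1 ruleList2)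

-- ===== LEMMAS AND PROOFS =====

-- the all-pairs |var1| < |var2| test on the deduplicated flattenings equals the bounds comparison
theorem appendable_eq_pvOk (rs1 rs2 : List (List Int)) :
    appendable (PySem.Set.ofList rs1.flatten) (PySem.Set.ofList rs2.flatten)
      = pvOk (pvMaxAbs? rs1) (pvMinAbs? rs2) := by
  refine Bool.coe_iff_coe.mp ?_
  simp only [appendable, List.all_eq_true, decide_eq_true_eq, PySem.Set.mem_ofList]
  unfold pvOk pvMaxAbs? pvMinAbs?
  rcases h1 : (rs1.flatten.map (fun x => |x|)).max? with _ | M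
  · rw [List.max?_eq_none_iff] at h1
    simp only [List.map_eq_nil_iff] at h1
    simp [h1]
  · rcases h2 : (rs2.flatten.map (fun x => |x|)).min? with _ | m
    · rw [List.min?_eq_none_iff] at h2
      simp only [List.map_eq_nil_iff] at h2
      simp [h2]
    · rw [List.max?_eq_some_iff] at h1
      rw [List.min?_eq_some_iff] at h2
      simp only [List.mem_map] at h1 h2
      obtain ⟨⟨a, ha, haM⟩, hM⟩ := h1
      obtain ⟨⟨b, hb, hbm⟩, hm⟩ := h2
      simp only [decide_eq_true_eq]
      constructor
      · intro h
        subst haM hbm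
        exact h a ha b hb
      · intro h x hx y hy
        have h1 := hM _ ⟨x, hx, rfl⟩
        have h2 := hm _ ⟨y, hy, rfl⟩
        omega

-- inner-loop invariant: B's running set is the dedup of the flattening of A's running list
theorem inner_loop (rs1 : List (List Int)) (L2 : List (List (List Int)))
    (J : List (List (List Int))) :
    (L2.map (fun rs => (rs, pvMinAbs? rs))).foldl
        (fun seen q => if pvOk (pvMaxAbs? rs1) q.2
            then PySem.Set.update (PySem.Set.update seen rs1) q.1 else seen)
        (PySem.Set.ofList J.flatten)
      = PySem.Set.ofList
          (L2.foldl (fun acc rules2 =>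
            if appendable (PySem.Set.ofList rs1.flatten) (PySem.Set.ofList rules2.flatten)
              then acc ++ [rs1 ++ rules2] else acc) J).flatten := by
  induction L2 generalizing J with
  | nil => rfl
  | cons rs2 rest ih =>
    simp only [List.map_cons, List.foldl_cons]
    rw [appendable_eq_pvOk rs1 rs2]
    by_cases h : pvOk (pvMaxAbs? rs1) (pvMinAbs? rs2) = true
    · rw [if_pos h, if_pos h]
      have : PySem.Set.update (PySem.Set.update (PySem.Set.ofList J.flatten) rs1) rs2
          = PySem.Set.ofList (J ++ [rs1 ++ rs2]).flatten := by
        rw [List.flatten_append]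
        simp only [List.flatten_cons, List.flatten_nil, List.append_nil]
        rw [← List.append_assoc, PySem.Set.ofList_append, PySem.Set.ofList_append]
      rw [this]; exact ih (J ++ [rs1 ++ rs2])
    · rw [if_neg h, if_neg h]; exact ih J

theorem outer_loop (L1 L2 : List (List (List Int))) (J : List (List (List Int))) :
    (L1.map (fun rs => (rs, pvMaxAbs? rs))).foldl
        (fun seen p =>
          (L2.map (fun rs => (rs, pvMinAbs? rs))).foldl
            (fun seen q => if pvOk p.2 q.2
                then PySem.Set.update (PySem.Set.update seen p.1) q.1 else seen) seen)
        (PySem.Set.ofList J.flatten)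
      = PySem.Set.ofList
          (L1.foldl (fun acc rules1 =>
            L2.foldl (fun acc rules2 =>
              if appendable (PySem.Set.ofList rules1.flatten) (PySem.Set.ofList rules2.flatten)
                then acc ++ [rules1 ++ rules2] else acc) acc) J).flatten := by
  induction L1 generalizing J with
  | nil => rfl
  | cons rs1 rest ih =>
    simp only [List.map_cons, List.foldl_cons]
    rw [inner_loop]
    exact ih _

-- ===== VERDICT (by name: the statement is the Claim_ definition above) =====
theorem joinRules_spec : Claim_equal_joinRules := by
  intro L1 L2 _
  unfold Spec_joinRules joinRules joinRules_alt
  simpa using (outer_loop L1 L2 []).symm
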